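-- pv_equiv track=rewrite | github.com/csansoon/UPC-FIB | C/Secreta/2/operations.py | GF_product_p
-- ===== SOURCE A (Python) =====
-- m = [True, False, True, True, True, False, False, False, True]
--
-- def value(polinomi):
--     result = 0
--     for i in range(len(polinomi)):
--         result = result + (polinomi[i] * pow(2, i))
--     return result
--
-- def irreduct_polinomi(polinomi):
--     irreduct = False
--     while not irreduct:
--         index = len(polinomi) - 1
--         if polinomi[index]:
--             irreduct = True
--         else:
--             polinomi.pop(index)
--     return polinomi
--
-- def GF_mod(polinomi, module):
--     irreduct_polinomi(polinomi)
--     irreduct_polinomi(module)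
--     if value(polinomi) < value(module):
--         return polinomi
--     shifted_module = []
--     for element in module:
--         shifted_module.append(element)
--     while len(polinomi) > len(shifted_module):
--         shifted_module.insert(0, False)
--     # polinomi & shifted_module should be the same size by now
--     for index in range(len(polinomi)):
--         polinomi[index] = polinomi[index] ^ shifted_module[index]
--     return GF_mod(polinomi, module)
--
-- def GF_product_p(a, b):
--     products = []
--     for a_index in range(len(a)):
--         if a[a_index]:
--             for b_index in range(len(b)):
--                 if b[b_index]:
--                     if not (a_index + b_index) in products:
--                         products.append(a_index + b_index)
--                     else:
--                         products.remove(a_index + b_index)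
--     #
--     result = []
--     for i in range(max(products) + 1):
--         result.append(False)
--     for product_value in products:
--         result[product_value] = True
--
--     modded_result = GF_mod(result, m)
--     return modded_result
-- ===== SOURCE B (Python) =====
-- M = [True, False, True, True, True, False, False, False, True]
--
-- def _strip(c):
--     while c and not c[-1]:
--         c.pop()
--
-- def _ge_m(c):
--     # c has length 9; lexicographic-from-top comparison with M: c >= M ?
--     for k in range(8, -1, -1):
--         if c[k] != M[k]:
--             return c[k]
--     return True
--
-- def GF_product_p(a, b):
--     # carry-less multiply: parity array indexed by degree sum
--     c = [False] * (len(a) + len(b) - 1)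
--     for i in range(len(a)):
--         if a[i]:
--             for j in range(len(b)):
--                 c[i + j] ^= b[j]
--     _strip(c)
--     # reduce: one aligned XOR per leading degree, top-down
--     while len(c) > 9 or (len(c) == 9 and _ge_m(c)):
--         s = len(c) - 9
--         for k in range(9):
--             c[s + k] ^= M[k]
--         _strip(c)
--     return c
-- ===== Notes on version B (the rewrite author's own statement) =====
-- stated objective: faster
-- what changed: B replaces A's toggle-membership list (linear scan per coefficient pair) and its recursive value-comparing GF_mod by a parity array indexed by degree sum plus a single top-down aligned-XOR reduction loop.
-- outside the precondition, e.g. on GF_product_p([], [True]): A raises ValueError, B returns []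
-- crash fix: On inputs where a or b has no True coefficient A raises ValueError (max of empty list), and on inputs whose GF(2) product is divisible by the modulus m A raises IndexError (its reduction reaches the zero polynomial); B returns [] there. — e.g. on GF_product_p([], [true]): A raises ValueError, B returns []
import Mathlib
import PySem

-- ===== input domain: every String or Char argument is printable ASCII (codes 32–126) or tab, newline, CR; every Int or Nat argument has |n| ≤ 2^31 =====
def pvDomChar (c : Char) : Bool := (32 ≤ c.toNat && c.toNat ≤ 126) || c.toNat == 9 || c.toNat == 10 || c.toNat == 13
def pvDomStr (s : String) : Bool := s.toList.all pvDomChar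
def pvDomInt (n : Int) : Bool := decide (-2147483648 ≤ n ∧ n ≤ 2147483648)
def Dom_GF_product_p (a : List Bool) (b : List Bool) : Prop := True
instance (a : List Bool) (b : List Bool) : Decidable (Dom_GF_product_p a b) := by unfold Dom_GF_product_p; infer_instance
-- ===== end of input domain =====

-- B replaces A's toggle-membership list of degrees and its recursive value-comparing GF_mod
-- by a parity array indexed by degree sum and a single top-down aligned-XOR reduction loop
-- (objective: faster — the per-pair membership/remove scans disappear).

-- ===== PORT A =====
-- the module-level constant m
def mListA : List Bool := [true, false, true, true, true, false, false, false, true]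

-- value(polinomi): every index i is in range, so polinomi[i] is ported as getD i false
def valueA (l : List Bool) : Int :=
  (List.range l.length).foldl (fun r i => r + (if l.getD i false then 1 else 0) * 2 ^ i) 0

-- irreduct_polinomi: polinomi[len-1] on the empty list is polinomi[-1] : IndexError → none
def irreductA (l : List Bool) : Option (List Bool) :=
  match h : l.getLast? with
  | none => none
  | some true => some l
  | some false => irreductA l.dropLast
termination_by l.length
decreasing_by
  have hne : l ≠ [] := by rintro rfl; simp at h
  have := List.length_pos_iff.mpr hne
  simp [List.length_dropLast]; omega

-- GF_mod, with an explicit fuel counter: value(polinomi) strictly decreases at each recursive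
-- call (proved below), so fuel = value+1 at the call site is never exhausted inside Pre_;
-- the `while len > len: insert(0, False)` padding loop prepends len p − len m Falses
def gfmodA : Nat → List Bool → List Bool → Option (List Bool)
  | 0, _, _ => none
  | fuel+1, p0, m0 =>
    match irreductA p0, irreductA m0 with
    | some p, some mo =>
      if valueA p < valueA mo then some p
      else
        let sh := List.replicate (p.length - mo.length) false ++ mo
        let q := (List.range p.length).foldl (fun q i => q.set i (q.getD i false ^^ sh.getD i false)) p
        gfmodA fuel q mo
    | _, _ => none

-- the products toggle list; python's guarded .remove of a present element is List.erase
def productsA (a b : List Bool) : List Nat :=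
  (List.range a.length).foldl (fun ps i =>
    if a.getD i false then
      (List.range b.length).foldl (fun ps j =>
        if b.getD j false then
          if (i + j) ∈ ps then ps.erase (i + j)
          else ps ++ [i + j]
        else ps) ps
    else ps) []

def GF_product_p (a : List Bool) (b : List Bool) : List Bool :=
  match PySem.List.max? (productsA a b) (fun x => x) with
  | none => []    -- python: max([]) raises ValueError (excluded by Pre_)
  | some mx =>
    let r0 := (List.range (mx + 1)).foldl (fun r _ => r ++ [false]) []
    let result := (productsA a b).foldl (fun r v => r.set v true) r0
    (gfmodA ((valueA result).toNat + 1) result mListA).getD []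

-- ===== PORT B =====
def mListB : List Bool := [true, false, true, true, true, false, false, false, true]

-- _strip: while c and not c[-1]: c.pop()   (fuel length+1 always suffices)
def stripGoB : Nat → List Bool → List Bool
  | 0, c => c
  | f+1, c =>
    match c.getLast? with
    | some false => stripGoB f c.dropLast
    | _ => c

def stripB (c : List Bool) : List Bool := stripGoB (c.length + 1) c

-- _ge_m: the loop over range(8, -1, -1)
def geGoB (c : List Bool) : List Nat → Bool
  | [] => true
  | k :: ks => if c.getD k false ≠ mListB.getD k false then c.getD k false else geGoB c ks

def geB (c : List Bool) : Bool := geGoB c [8, 7, 6, 5, 4, 3, 2, 1, 0]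

-- the aligned XOR: for k in range(9): c[s+k] ^= M[k]  with s = len(c) - 9
def xorMB (c : List Bool) : List Bool :=
  (List.range 9).foldl
    (fun q k => q.set (c.length - 9 + k) (q.getD (c.length - 9 + k) false ^^ mListB.getD k false)) c

-- the reduction while-loop; the stripped length strictly decreases at every iteration,
-- so fuel = length+1 at the call site is never exhausted
def reduceB : Nat → List Bool → List Bool
  | 0, c => c
  | f+1, c =>
    if 9 < c.length ∨ (c.length = 9 ∧ geB c = true) then reduceB f (stripB (xorMB c)) else c

def GF_product_p_alt (a : List Bool) (b : List Bool) : List Bool :=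
  let c0 := List.replicate (a.length + b.length - 1) false
  let c1 := (List.range a.length).foldl (fun c i =>
      if a.getD i false then
        (List.range b.length).foldl
          (fun c j => c.set (i + j) (c.getD (i + j) false ^^ b.getD j false)) c
      else c) c0
  let c := stripB c1
  reduceB (c.length + 1) c

-- ===== PRECONDITION & SPEC =====
-- the little-endian value of a coefficient list, and the GF(2) product value of two lists
def valN (l : List Bool) : Nat := l.foldr (fun bit acc => (if bit then 1 else 0) + 2 * acc) 0

def prodValN : List Bool → List Bool → Nat
  | [], _ => 0
  | x :: xs, b => (if x then valN b else 0) ^^^ (2 * prodValN xs b)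

-- A's reduction on values: XOR the value 285 of m, aligned to the top bit, while ≥ 285;
-- the value strictly decreases at each step, so fuel p+1 reaches the fixpoint
def red285Go : Nat → Nat → Nat
  | 0, p => p
  | f+1, p => if p < 285 then p else red285Go f (p ^^^ (285 <<< (p.log2 - 8)))

def red285 (p : Nat) : Nat := red285Go (p + 1) p

-- Pre_ excludes exactly the inputs where A raises: a or b without a True coefficient
-- (max of the empty products list raises ValueError) and inputs whose GF(2) product is
-- divisible by the modulus m (A's reduction reaches the zero polynomial and raises IndexError).
def Pre_GF_product_p (a : List Bool) (b : List Bool) : Prop :=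
  true ∈ a ∧ true ∈ b ∧ red285 (prodValN a b) ≠ 0

instance (a : List Bool) (b : List Bool) : Decidable (Pre_GF_product_p a b) := by
  unfold Pre_GF_product_p; infer_instance

def pvWitness_GF_product_p : List Bool × List Bool := ([true, true], [true])

-- On inputs where a or b has no True coefficient A raises ValueError, and on inputs whose
-- GF(2) product is divisible by m A raises IndexError; B returns [] on all of them.
def Raises_GF_product_p (a : List Bool) (b : List Bool) : Prop :=
  true ∉ a ∨ true ∉ b ∨ red285 (prodValN a b) = 0

instance (a : List Bool) (b : List Bool) : Decidable (Raises_GF_product_p a b) := by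
  unfold Raises_GF_product_p; infer_instance

def pvRaiseWitness_GF_product_p : List Bool × List Bool := ([], [true])
def pvRaiseWitnessOut_GF_product_p : List Bool := []

def Spec_GF_product_p (a : List Bool) (b : List Bool) (out : List Bool) : Prop :=
  out = GF_product_p_alt a b

instance (a : List Bool) (b : List Bool) (out : List Bool) : Decidable (Spec_GF_product_p a b out) := by
  unfold Spec_GF_product_p; infer_instance

-- ===== CLAIM (what is proved, stated in full; the proofs are below) =====
def Claim_equal_GF_product_p : Prop := ∀ (a : List Bool) (b : List Bool), Dom_GF_product_p a b → Pre_GF_product_p a b → Spec_GF_product_p a b (GF_product_p a b)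

def Claim_raises_GF_product_p : Prop := (∀ (a : List Bool) (b : List Bool), Dom_GF_product_p a b → Raises_GF_product_p a b → ¬ Pre_GF_product_p a b) ∧ (Dom_GF_product_p (pvRaiseWitness_GF_product_p.1) (pvRaiseWitness_GF_product_p.2) ∧ Raises_GF_product_p (pvRaiseWitness_GF_product_p.1) (pvRaiseWitness_GF_product_p.2) ∧ GF_product_p_alt (pvRaiseWitness_GF_product_p.1) (pvRaiseWitness_GF_product_p.2) = pvRaiseWitnessOut_GF_product_p)


-- ===== LEMMAS AND PROOFS =====

-- ---- valN and bits ----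
theorem valN_cons (x : Bool) (t : List Bool) :
    valN (x :: t) = (if x then 1 else 0) + 2 * valN t := rfl

theorem valN_testBit (l : List Bool) (k : Nat) :
    (valN l).testBit k = l.getD k false := by
  induction l generalizing k with
  | nil => simp [valN]
  | cons x t ih =>
    rw [valN_cons]
    cases k with
    | zero =>
      cases x <;> simp [Nat.testBit_zero, Nat.add_mul_mod_self_left, Nat.mul_mod_right]
    | succ k =>
      have h2 : ((if x then 1 else 0) + 2 * valN t) / 2 = valN t := by cases x <;> simp <;> omega
      rw [Nat.testBit_succ, h2, ih]
      simp

theorem getD_eq_false_of_le (l : List Bool) (k : Nat) (h : l.length ≤ k) :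
    l.getD k false = false := by
  simp [List.getD_eq_getElem?_getD, List.getElem?_eq_none h]

theorem valN_lt (l : List Bool) : valN l < 2 ^ l.length := by
  induction l with
  | nil => simp [valN]
  | cons x t ih => rw [valN_cons]; cases x <;> simp <;> omega

theorem testBit_ge {n i : Nat} (h : n.testBit i = true) : 2 ^ i ≤ n := by
  by_contra hc
  rw [Nat.testBit_eq_false_of_lt (by omega)] at h
  exact Bool.false_ne_true h

theorem valN_eq_zero_iff (l : List Bool) : valN l = 0 ↔ true ∉ l := by
  induction l with
  | nil => simp [valN]
  | cons x t ih => rw [valN_cons]; cases x <;> simp [ih] <;> omega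

theorem getLast?_getD (l : List Bool) (x : Bool) (h : l.getLast? = some x) :
    l.getD (l.length - 1) false = x := by
  rw [List.getLast?_eq_getElem?] at h
  simp [List.getD_eq_getElem?_getD, h]

theorem getLast?_of_getD (l : List Bool) (h : l ≠ []) :
    l.getLast? = some (l.getD (l.length - 1) false) := by
  rw [List.getLast?_eq_getElem?]
  have : l.length - 1 < l.length := by
    have := List.length_pos_iff.mpr h; omega
  simp [List.getD_eq_getElem?_getD, List.getElem?_eq_getElem this]

theorem valN_ge_of_last (l : List Bool) (h : l.getLast? = some true) :
    2 ^ (l.length - 1) ≤ valN l := by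
  apply testBit_ge
  rw [valN_testBit]
  exact getLast?_getD l true h

theorem length_of_last (l : List Bool) (h : l.getLast? = some true) :
    l.length = (valN l).log2 + 1 := by
  have hne : l ≠ [] := by rintro rfl; simp at h
  have hlen : 1 ≤ l.length := List.length_pos_iff.mpr hne
  have hge := valN_ge_of_last l h
  have hlt := valN_lt l
  have hnz : valN l ≠ 0 := by
    have : (1:Nat) ≤ 2 ^ (l.length - 1) := Nat.one_le_two_pow
    omega
  have h1 : l.length - 1 ≤ (valN l).log2 := (Nat.le_log2 hnz).mpr hge
  have h2 : (valN l).log2 < l.length := (Nat.log2_lt hnz).mpr hlt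
  omega

theorem list_eq_of_getD (l₁ l₂ : List Bool) (h₁ : l₁.getLast? = some true)
    (h₂ : l₂.getLast? = some true) (h : ∀ k, l₁.getD k false = l₂.getD k false) :
    l₁ = l₂ := by
  have hlen : l₁.length = l₂.length := by
    by_contra hne
    rcases Nat.lt_or_ge l₁.length l₂.length with hlt | hge
    · have := h (l₂.length - 1)
      rw [getD_eq_false_of_le l₁ _ (by omega), getLast?_getD l₂ true h₂] at this
      exact Bool.false_ne_true this
    · have hlt : l₂.length < l₁.length := by omega
      have := h (l₁.length - 1)
      rw [getD_eq_false_of_le l₂ _ (by omega), getLast?_getD l₁ true h₁] at this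
      simp at this
  apply List.ext_getElem hlen
  intro i hi1 hi2
  have := h i
  simpa [List.getD_eq_getElem?_getD, List.getElem?_eq_getElem, hi1, hi2] using this

-- ---- xor top-bit cancellation and red285 ----
theorem shiftRight_one_of_bounds {k x : Nat} (h1 : 2 ^ k ≤ x) (h2 : x < 2 ^ (k + 1)) :
    x >>> k = 1 := by
  rw [Nat.shiftRight_eq_div_pow]
  rw [Nat.pow_succ] at h2
  have hpos : 0 < 2 ^ k := Nat.two_pow_pos _
  have hle : 1 ≤ x / 2 ^ k := (Nat.le_div_iff_mul_le hpos).mpr (by omega)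
  have hlt : x / 2 ^ k < 2 := Nat.div_lt_of_lt_mul (by omega)
  omega

theorem xor_top_cancel {k x y : Nat} (hx1 : 2 ^ k ≤ x) (hx2 : x < 2 ^ (k + 1))
    (hy1 : 2 ^ k ≤ y) (hy2 : y < 2 ^ (k + 1)) : x ^^^ y < 2 ^ k := by
  have hsh : (x ^^^ y) >>> k = 0 := by
    rw [Nat.shiftRight_xor_distrib, shiftRight_one_of_bounds hx1 hx2,
      shiftRight_one_of_bounds hy1 hy2]
    rfl
  rw [Nat.shiftRight_eq_div_pow] at hsh
  have hpos : 0 < 2 ^ k := Nat.two_pow_pos _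
  exact (Nat.div_eq_zero_iff_lt hpos).mp hsh

theorem step_lt {v : Nat} (h : 285 ≤ v) : v ^^^ (285 <<< (v.log2 - 8)) < v := by
  have hnz : v ≠ 0 := by omega
  have h8 : 8 ≤ v.log2 := (Nat.le_log2 hnz).mpr (by norm_num; omega)
  set k := v.log2 with hk
  have hv1 : 2 ^ k ≤ v := Nat.log2_self_le hnz
  have hv2 : v < 2 ^ (k + 1) := Nat.lt_log2_self
  have hpow : (0:Nat) < 2 ^ (k - 8) := Nat.two_pow_pos _
  have hk8 : 2 ^ k = 2 ^ 8 * 2 ^ (k - 8) := by rw [← Nat.pow_add]; congr 1; omega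
  have hk9 : 2 ^ (k + 1) = 2 ^ 9 * 2 ^ (k - 8) := by rw [← Nat.pow_add]; congr 1; omega
  have hs1 : 2 ^ k ≤ 285 <<< (k - 8) := by
    rw [Nat.shiftLeft_eq, hk8]; norm_num
  have hs2 : 285 <<< (k - 8) < 2 ^ (k + 1) := by
    rw [Nat.shiftLeft_eq, hk9]; norm_num
  calc v ^^^ (285 <<< (k - 8)) < 2 ^ k := xor_top_cancel hv1 hv2 hs1 hs2
  _ ≤ v := hv1

theorem red285Go_fuel : ∀ (f₁ f₂ p : Nat), p < f₁ → p < f₂ → red285Go f₁ p = red285Go f₂ p := by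
  intro f₁
  induction f₁ using Nat.strong_induction_on with
  | _ f₁ ih =>
    intro f₂ p h1 h2
    match f₁, f₂, h1, h2 with
    | f₁+1, f₂+1, h1, h2 =>
      simp only [red285Go]
      split
      · rfl
      · rename_i hge
        have hst : p ^^^ (285 <<< (p.log2 - 8)) < p := step_lt (by omega)
        exact ih (f₁) (by omega) (f₂) _ (by omega) (by omega)

theorem red285_eq (p : Nat) :
    red285 p = if p < 285 then p else red285 (p ^^^ (285 <<< (p.log2 - 8))) := by
  unfold red285
  conv_lhs => rw [show p + 1 = p + 1 from rfl]
  simp only [red285Go]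
  split
  · rfl
  · rename_i hge
    have hst : p ^^^ (285 <<< (p.log2 - 8)) < p := step_lt (by omega)
    exact red285Go_fuel p ((p ^^^ (285 <<< (p.log2 - 8))) + 1) (p ^^^ (285 <<< (p.log2 - 8))) (by omega) (by omega)

-- ---- getD / set / append ----
theorem getD_set (c : List Bool) (k i : Nat) (x : Bool) :
    (c.set k x).getD i false = if k = i ∧ k < c.length then x else c.getD i false := by
  simp only [List.getD_eq_getElem?_getD, List.getElem?_set]
  split_ifs with h1 h2 h3 <;> simp_all <;> omega

theorem getD_concat (c : List Bool) (x : Bool) (k : Nat) :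
    (c ++ [x]).getD k false = if k = c.length then x else c.getD k false := by
  rcases Nat.lt_trichotomy k c.length with h | h | h
  · rw [List.getD_eq_getElem?_getD, List.getElem?_append_left h, if_neg (by omega),
      List.getD_eq_getElem?_getD]
  · subst h
    rw [List.getD_eq_getElem?_getD, List.getElem?_append_right (le_refl _)]
    simp
  · rw [List.getD_eq_getElem?_getD, List.getElem?_append_right (by omega), if_neg (by omega)]
    have h1 : (1:Nat) ≤ k - c.length := by omega
    rw [List.getElem?_eq_none (by simp; omega), getD_eq_false_of_le c k (by omega)]
    rfl

-- ---- stripB ----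
theorem stripB_concat_false (c : List Bool) : stripB (c ++ [false]) = stripB c := by
  show stripGoB ((c ++ [false]).length + 1) (c ++ [false]) = stripB c
  rw [show (c ++ [false]).length + 1 = (c.length + 1) + 1 by simp]
  simp only [stripGoB, List.getLast?_concat, List.dropLast_concat]
  rfl

theorem stripB_concat_true (c : List Bool) : stripB (c ++ [true]) = c ++ [true] := by
  show stripGoB ((c ++ [true]).length + 1) (c ++ [true]) = c ++ [true]
  rw [show (c ++ [true]).length + 1 = (c.length + 1) + 1 by simp]
  simp only [stripGoB, List.getLast?_concat]

theorem stripB_last_true (c : List Bool) (h : c.getLast? = some true) : stripB c = c := by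
  unfold stripB
  simp only [stripGoB, h]

theorem strip_getD (c : List Bool) (k : Nat) :
    (stripB c).getD k false = c.getD k false := by
  induction c using List.reverseRecOn with
  | nil => rfl
  | append_singleton c x ih =>
    cases x
    · rw [stripB_concat_false, getD_concat]
      split
      · rename_i he; subst he; rw [ih, getD_eq_false_of_le c _ (le_refl _)]
      · exact ih
    · rw [stripB_concat_true]

theorem strip_shape (c : List Bool) : stripB c = [] ∨ (stripB c).getLast? = some true := by
  induction c using List.reverseRecOn with
  | nil => left; rfl
  | append_singleton c x ih =>
    cases x
    · rw [stripB_concat_false]; exact ih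
    · right; rw [stripB_concat_true, List.getLast?_concat]

theorem strip_length_le (c : List Bool) : (stripB c).length ≤ c.length := by
  induction c using List.reverseRecOn with
  | nil => simp [stripB, stripGoB]
  | append_singleton c x ih =>
    cases x
    · rw [stripB_concat_false]; simp; omega
    · rw [stripB_concat_true]

theorem strip_length_lt (c : List Bool) (h : c.getLast? = some false) :
    (stripB c).length < c.length := by
  have hne : c ≠ [] := by rintro rfl; simp at h
  have hdec : c.dropLast ++ [false] = c := by
    have h2 : c.getLast hne = false := by
      rw [List.getLast?_eq_some_getLast hne] at h; injection h
    rw [← h2]; exact List.dropLast_concat_getLast hne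
  rw [← hdec, stripB_concat_false]
  have := strip_length_le c.dropLast
  simp only [List.length_append, List.length_cons, List.length_nil]
  omega

theorem valN_strip (c : List Bool) : valN (stripB c) = valN c := by
  apply Nat.eq_of_testBit_eq
  intro i
  rw [valN_testBit, valN_testBit, strip_getD]

theorem strip_Tt (c : List Bool) (h : true ∈ c) : (stripB c).getLast? = some true := by
  rcases strip_shape c with h0 | h1
  · exfalso
    have : valN c = 0 := by rw [← valN_strip, h0]; rfl
    exact (valN_eq_zero_iff c).mp this h
  · exact h1

-- ---- irreductA computes stripB ----
theorem irreductA_eq_strip (l : List Bool) (h : true ∈ l) :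
    irreductA l = some (stripB l) := by
  induction l using List.reverseRecOn with
  | nil => simp at h
  | append_singleton c x ih =>
    cases x
    · have hmem : true ∈ c := by simpa using h
      rw [irreductA]
      split
      · rename_i heq; rw [List.getLast?_concat] at heq; exact absurd heq (by simp)
      · rename_i heq; rw [List.getLast?_concat] at heq; exact absurd heq (by simp)
      · rename_i heq
        rw [List.dropLast_concat, stripB_concat_false]
        exact ih hmem
    · rw [irreductA]
      split
      · rename_i heq; rw [List.getLast?_concat] at heq; exact absurd heq (by simp)
      · rw [stripB_concat_true]
      · rename_i heq; rw [List.getLast?_concat] at heq; exact absurd heq (by simp)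

-- ---- valueA = valN ----
theorem valueA_gen (l : List Bool) : ∀ (r : Int) (j : Nat),
    (List.range l.length).foldl (fun r i => r + (if l.getD i false then 1 else 0) * 2 ^ (j + i)) r
      = r + (valN l : Int) * 2 ^ j := by
  induction l with
  | nil => intro r j; simp [valN]
  | cons x t ih =>
    intro r j
    rw [show (x :: t).length = t.length + 1 from rfl, List.range_succ_eq_map]
    rw [List.foldl_cons, List.foldl_map]
    have hb : (fun (r : Int) (i : Nat) =>
          r + (if (x :: t).getD i.succ false then 1 else 0) * 2 ^ (j + i.succ))
        = fun (r : Int) (i : Nat) => r + (if t.getD i false then 1 else 0) * 2 ^ ((j + 1) + i) := by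
      funext r i
      rw [List.getD_cons_succ, show j + i.succ = (j + 1) + i by omega]
    rw [hb, ih]
    rw [valN_cons]
    push_cast
    cases x <;> simp <;> ring

theorem valueA_eq (l : List Bool) : valueA l = (valN l : Int) := by
  have h := valueA_gen l 0 0
  simp only [zero_add, pow_zero, mul_one] at h
  unfold valueA
  rw [← h]

theorem valueA_m : valueA mListA = 285 := by decide

-- ---- characterizations of the two aligned-XOR computations ----
theorem foldxorA_char (sh : List Bool) : ∀ (n : Nat) (p : List Bool), n ≤ p.length →
    ((List.range n).foldl (fun q i => q.set i (q.getD i false ^^ sh.getD i false)) p).length = p.length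
    ∧ ∀ k, ((List.range n).foldl (fun q i => q.set i (q.getD i false ^^ sh.getD i false)) p).getD k false
        = if k < n then p.getD k false ^^ sh.getD k false else p.getD k false := by
  intro n
  induction n with
  | zero => intro p _; simp
  | succ n ih =>
    intro p hn
    rw [List.range_succ, List.foldl_append, List.foldl_cons, List.foldl_nil]
    obtain ⟨ihl, ihc⟩ := ih p (by omega)
    constructor
    · rw [List.length_set, ihl]
    · intro k
      rw [getD_set, ihc n, ihc k, ihl]
      by_cases hk : k = n
      · subst hk
        rw [if_pos ⟨rfl, by omega⟩, if_neg (by omega : ¬ k < k), if_pos (by omega : k < k + 1)]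
      · rw [if_neg (by omega : ¬ (n = k ∧ n < p.length))]
        by_cases hkn : k < n
        · rw [if_pos hkn, if_pos (by omega)]
        · rw [if_neg hkn, if_neg (by omega)]

theorem foldxorB_char (s : Nat) : ∀ (n : Nat) (c : List Bool), s + n ≤ c.length →
    ((List.range n).foldl (fun q k => q.set (s + k) (q.getD (s + k) false ^^ mListB.getD k false)) c).length = c.length
    ∧ ∀ k, ((List.range n).foldl (fun q k => q.set (s + k) (q.getD (s + k) false ^^ mListB.getD k false)) c).getD k false
        = if s ≤ k ∧ k < s + n then c.getD k false ^^ mListB.getD (k - s) false else c.getD k false := by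
  intro n
  induction n with
  | zero =>
    intro c _
    refine ⟨rfl, fun k => ?_⟩
    rw [if_neg (by omega)]
    rfl
  | succ n ih =>
    intro c hn
    rw [List.range_succ, List.foldl_append, List.foldl_cons, List.foldl_nil]
    obtain ⟨ihl, ihc⟩ := ih c (by omega)
    constructor
    · rw [List.length_set, ihl]
    · intro k
      rw [getD_set, ihc (s + n), ihc k, ihl]
      by_cases hk : k = s + n
      · subst hk
        rw [if_pos ⟨rfl, by omega⟩, if_neg (by omega), if_pos ⟨by omega, by omega⟩]
        congr 2
        omega
      · by_cases hin : s ≤ k ∧ k < s + n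
        · rw [if_neg (by omega), if_pos hin, if_pos ⟨by omega, by omega⟩]
        · rw [if_neg (by omega), if_neg hin, if_neg (by omega)]

theorem xorMB_char (c : List Bool) (h9 : 9 ≤ c.length) :
    (xorMB c).length = c.length
    ∧ ∀ k, (xorMB c).getD k false
        = if c.length - 9 ≤ k ∧ k < c.length then c.getD k false ^^ mListB.getD (k - (c.length - 9)) false
          else c.getD k false := by
  have h := foldxorB_char (c.length - 9) 9 c (by omega)
  rw [show c.length - 9 + 9 = c.length by omega] at h
  exact h

theorem getD_pad (s : Nat) (m : List Bool) (k : Nat) :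
    (List.replicate s false ++ m).getD k false = if k < s then false else m.getD (k - s) false := by
  by_cases h : k < s
  · rw [List.getD_eq_getElem?_getD, List.getElem?_append_left (by simp; omega), if_pos h]
    simp [h]
  · rw [List.getD_eq_getElem?_getD, List.getElem?_append_right (by simp; omega), if_neg h]
    simp [List.getD_eq_getElem?_getD]

theorem xorA_eq_xorB (p : List Bool) (h9 : 9 ≤ p.length) :
    (List.range p.length).foldl
      (fun q i => q.set i (q.getD i false ^^ (List.replicate (p.length - mListA.length) false ++ mListA).getD i false)) p
    = xorMB p := by
  have hm : mListA.length = 9 := rfl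
  obtain ⟨hal, hac⟩ := foldxorA_char (List.replicate (p.length - mListA.length) false ++ mListA) p.length p (le_refl _)
  obtain ⟨hbl, hbc⟩ := xorMB_char p h9
  apply List.ext_getElem (by rw [hal, hbl])
  intro i h1 h2
  have hgd : ∀ (l : List Bool) (h : i < l.length), l[i] = l.getD i false := by
    intro l h; simp [List.getD_eq_getElem?_getD, List.getElem?_eq_getElem h]
  rw [hgd _ h1, hgd _ h2, hac i, hbc i, getD_pad]
  rw [hm]
  have hip : i < p.length := by rwa [hal] at h1
  by_cases his : i < p.length - 9
  · rw [if_pos hip, if_pos his, if_neg (by omega)]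
    simp
  · rw [if_pos hip, if_neg his, if_pos ⟨by omega, hip⟩]
    rfl

theorem mB_getD (k : Nat) : mListB.getD k false = (285 : Nat).testBit k := by
  have h := valN_testBit mListB k
  rw [show valN mListB = 285 by rfl] at h
  exact h.symm

theorem valN_xorM (p : List Bool) (h9 : 9 ≤ p.length) :
    valN (xorMB p) = valN p ^^^ (285 <<< (p.length - 9)) := by
  obtain ⟨hl, hc⟩ := xorMB_char p h9
  apply Nat.eq_of_testBit_eq
  intro i
  rw [valN_testBit, Nat.testBit_xor, valN_testBit, Nat.testBit_shiftLeft, hc i]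
  set s := p.length - 9 with hs
  by_cases h1 : s ≤ i
  · by_cases h2 : i < p.length
    · rw [if_pos ⟨h1, h2⟩, mB_getD]
      simp [h1]
    · have hb : p.getD i false = false := getD_eq_false_of_le _ _ (by omega)
      have h285 : (285 : Nat).testBit (i - s) = false := by
        apply Nat.testBit_eq_false_of_lt
        have : (2:Nat) ^ 9 ≤ 2 ^ (i - s) := Nat.pow_le_pow_right (by omega) (by omega)
        omega
      rw [if_neg (by omega), hb, h285]
      simp [h1]
  · rw [if_neg (by omega)]
    simp [h1]

-- ---- the length-9 comparison against m ----
theorem ge9_iff (a0 a1 a2 a3 a4 a5 a6 a7 : Bool) :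
    geB [a0, a1, a2, a3, a4, a5, a6, a7, true] = true
      ↔ 285 ≤ valN [a0, a1, a2, a3, a4, a5, a6, a7, true] := by
  revert a0 a1 a2 a3 a4 a5 a6 a7
  decide

theorem list9 (c : List Bool) (h : c.length = 9) :
    ∃ a0 a1 a2 a3 a4 a5 a6 a7 a8, c = [a0, a1, a2, a3, a4, a5, a6, a7, a8] := by
  rcases c with _ | ⟨a0, c⟩; · simp at h
  rcases c with _ | ⟨a1, c⟩; · simp at h
  rcases c with _ | ⟨a2, c⟩; · simp at h
  rcases c with _ | ⟨a3, c⟩; · simp at h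
  rcases c with _ | ⟨a4, c⟩; · simp at h
  rcases c with _ | ⟨a5, c⟩; · simp at h
  rcases c with _ | ⟨a6, c⟩; · simp at h
  rcases c with _ | ⟨a7, c⟩; · simp at h
  rcases c with _ | ⟨a8, c⟩; · simp at h
  rcases c with _ | ⟨a9, c⟩
  · exact ⟨a0, a1, a2, a3, a4, a5, a6, a7, a8, rfl⟩
  · simp at h

-- ---- multiply stage: inner loops ----
theorem two_mul_testBit (m j : Nat) : (2 * m).testBit j = (decide (1 ≤ j) && m.testBit (j - 1)) := by
  rw [show 2 * m = m <<< 1 by rw [Nat.shiftLeft_eq]; ring, Nat.testBit_shiftLeft]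

theorem toggle_mem (ps : List Nat) (hnd : ps.Nodup) (v : Nat) :
    (if v ∈ ps then ps.erase v else ps ++ [v]).Nodup
    ∧ ∀ k, decide (k ∈ (if v ∈ ps then ps.erase v else ps ++ [v]))
        = ((decide (k ∈ ps)).xor (decide (k = v))) := by
  by_cases hv : v ∈ ps
  · rw [if_pos hv]
    refine ⟨hnd.erase v, fun k => ?_⟩
    have hme : k ∈ ps.erase v ↔ k ≠ v ∧ k ∈ ps := hnd.mem_erase_iff
    by_cases hk : k = v
    · subst hk; simp [hme, hv]
    · simp [hme, hk]
  · rw [if_neg hv]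
    constructor
    · simp [List.nodup_append, hnd]
      intro a ha hav
      exact hv (hav ▸ ha)
    · intro k
      by_cases hk : k = v
      · subst hk; simp [hv]
      · simp [hk]

theorem innerB_char (b : List Bool) : ∀ (i : Nat) (c : List Bool), i + b.length ≤ c.length →
    ((List.range b.length).foldl (fun c j => c.set (i + j) (c.getD (i + j) false ^^ b.getD j false)) c).length = c.length
    ∧ ∀ k, ((List.range b.length).foldl (fun c j => c.set (i + j) (c.getD (i + j) false ^^ b.getD j false)) c).getD k false
        = ((c.getD k false).xor (decide (i ≤ k) && b.getD (k - i) false)) := by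
  induction b with
  | nil => intro i c _; refine ⟨rfl, fun k => ?_⟩; simp
  | cons x t ih =>
    intro i c hb
    rw [show (x :: t).length = t.length + 1 from rfl, List.range_succ_eq_map, List.foldl_cons,
      List.foldl_map]
    have hlam : (fun (c : List Bool) (j : Nat) =>
          c.set (i + j.succ) (c.getD (i + j.succ) false ^^ (x :: t).getD j.succ false))
        = fun (c : List Bool) (j : Nat) =>
          c.set ((i + 1) + j) (c.getD ((i + 1) + j) false ^^ t.getD j false) := by
      funext c j
      rw [List.getD_cons_succ, show i + j.succ = (i + 1) + j by omega]
    rw [hlam]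
    have hc1len : (c.set (i + 0) (c.getD (i + 0) false ^^ (x :: t).getD 0 false)).length = c.length := by
      simp
    obtain ⟨ihl, ihc⟩ := ih (i + 1) (c.set (i + 0) (c.getD (i + 0) false ^^ (x :: t).getD 0 false))
      (by rw [hc1len]; simp at hb; omega)
    refine ⟨by rw [ihl, hc1len], fun k => ?_⟩
    rw [ihc k]
    have hgd : (c.set (i + 0) (c.getD (i + 0) false ^^ (x :: t).getD 0 false)).getD k false
        = if i = k ∧ i < c.length then c.getD i false ^^ x else c.getD k false := by
      simp only [Nat.add_zero, List.getD_cons_zero]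
      exact getD_set c i k _
    rw [hgd]
    by_cases hk : k = i
    · subst hk
      rw [if_pos ⟨rfl, by simp at hb; omega⟩]
      have d1 : decide (k + 1 ≤ k) = false := by simp
      rw [d1, Nat.sub_self]
      simp
    · by_cases hik : i ≤ k
      · have hgt : (x :: t).getD (k - i) false = t.getD (k - (i + 1)) false := by
          rw [show k - i = (k - (i + 1)) + 1 by omega, List.getD_cons_succ]
        rw [if_neg (by omega), hgt]
        have d1 : decide (i ≤ k) = true := by simpa using hik
        have d2 : decide (i + 1 ≤ k) = true := by simp; omega
        rw [d1, d2]
      · rw [if_neg (by omega)]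
        have d1 : decide (i ≤ k) = false := by simpa using hik
        have d2 : decide (i + 1 ≤ k) = false := by simp; omega
        rw [d1, d2]
        simp

theorem innerA_char (b : List Bool) : ∀ (i : Nat) (ps : List Nat), ps.Nodup →
    ((List.range b.length).foldl (fun ps j => if b.getD j false then (if (i + j) ∈ ps then ps.erase (i + j) else ps ++ [i + j]) else ps) ps).Nodup
    ∧ ∀ k, decide (k ∈ (List.range b.length).foldl (fun ps j => if b.getD j false then (if (i + j) ∈ ps then ps.erase (i + j) else ps ++ [i + j]) else ps) ps)
        = ((decide (k ∈ ps)).xor (decide (i ≤ k) && b.getD (k - i) false)) := by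
  induction b with
  | nil => intro i ps hnd; refine ⟨hnd, fun k => ?_⟩; simp
  | cons x t ih =>
    intro i ps hnd
    rw [show (x :: t).length = t.length + 1 from rfl, List.range_succ_eq_map, List.foldl_cons,
      List.foldl_map]
    have hlam : (fun (ps : List Nat) (j : Nat) =>
          if (x :: t).getD j.succ false then (if (i + j.succ) ∈ ps then ps.erase (i + j.succ) else ps ++ [i + j.succ]) else ps)
        = fun (ps : List Nat) (j : Nat) =>
          if t.getD j false then (if ((i + 1) + j) ∈ ps then ps.erase ((i + 1) + j) else ps ++ [(i + 1) + j]) else ps := by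
      funext ps j
      rw [List.getD_cons_succ, show i + j.succ = (i + 1) + j by omega]
    rw [hlam]
    have h1 : (if (x :: t).getD 0 false then (if (i + 0) ∈ ps then ps.erase (i + 0) else ps ++ [i + 0]) else ps).Nodup
        ∧ ∀ k, decide (k ∈ (if (x :: t).getD 0 false then (if (i + 0) ∈ ps then ps.erase (i + 0) else ps ++ [i + 0]) else ps))
            = ((decide (k ∈ ps)).xor (x && decide (k = i))) := by
      simp only [List.getD_cons_zero, Nat.add_zero]
      cases x
      · exact ⟨hnd, fun k => by simp⟩
      · obtain ⟨ha, hb2⟩ := toggle_mem ps hnd i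
        exact ⟨by simpa using ha, fun k => by simpa using hb2 k⟩
    obtain ⟨hnd1, hm1⟩ := h1
    obtain ⟨ihnd, ihc⟩ := ih (i + 1) _ hnd1
    refine ⟨ihnd, fun k => ?_⟩
    rw [ihc k, hm1 k]
    by_cases hk : k = i
    · subst hk
      have d1 : decide (k + 1 ≤ k) = false := by simp
      rw [d1, Nat.sub_self]
      simp
    · by_cases hik : i ≤ k
      · have hgt : (x :: t).getD (k - i) false = t.getD (k - (i + 1)) false := by
          rw [show k - i = (k - (i + 1)) + 1 by omega, List.getD_cons_succ]
        have d1 : decide (i ≤ k) = true := by simpa using hik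
        have d2 : decide (i + 1 ≤ k) = true := by simp; omega
        have d3 : decide (k = i) = false := by simpa using hk
        rw [hgt, d1, d2, d3]
        simp
      · have d1 : decide (i ≤ k) = false := by simpa using hik
        have d2 : decide (i + 1 ≤ k) = false := by simp; omega
        have d3 : decide (k = i) = false := by simpa using hk
        rw [d1, d2, d3]
        simp

-- ---- multiply stage: outer loops ----
theorem outerB_char (b : List Bool) (a : List Bool) : ∀ (off : Nat) (c : List Bool),
    off + a.length + b.length ≤ c.length + 1 →
    ((List.range a.length).foldl (fun c i => if a.getD i false then
        (List.range b.length).foldl (fun c j => c.set ((off + i) + j) (c.getD ((off + i) + j) false ^^ b.getD j false)) c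
      else c) c).length = c.length
    ∧ ∀ k, ((List.range a.length).foldl (fun c i => if a.getD i false then
        (List.range b.length).foldl (fun c j => c.set ((off + i) + j) (c.getD ((off + i) + j) false ^^ b.getD j false)) c
      else c) c).getD k false
        = ((c.getD k false).xor (decide (off ≤ k) && (prodValN a b).testBit (k - off))) := by
  induction a with
  | nil => intro off c _; refine ⟨rfl, fun k => ?_⟩; simp [prodValN]
  | cons x t ih =>
    intro off c hb
    rw [show (x :: t).length = t.length + 1 from rfl, List.range_succ_eq_map, List.foldl_cons,
      List.foldl_map]
    have hlam : (fun (c : List Bool) (i : Nat) => if (x :: t).getD i.succ false then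
          (List.range b.length).foldl (fun c j => c.set ((off + i.succ) + j) (c.getD ((off + i.succ) + j) false ^^ b.getD j false)) c
        else c)
        = fun (c : List Bool) (i : Nat) => if t.getD i false then
          (List.range b.length).foldl (fun c j => c.set (((off + 1) + i) + j) (c.getD (((off + 1) + i) + j) false ^^ b.getD j false)) c
        else c := by
      funext c i
      rw [List.getD_cons_succ, show off + i.succ = (off + 1) + i by omega]
    rw [hlam]
    have hc1 : (if (x :: t).getD 0 false then
          (List.range b.length).foldl (fun c j => c.set ((off + 0) + j) (c.getD ((off + 0) + j) false ^^ b.getD j false)) c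
        else c).length = c.length
        ∧ ∀ k, (if (x :: t).getD 0 false then
          (List.range b.length).foldl (fun c j => c.set ((off + 0) + j) (c.getD ((off + 0) + j) false ^^ b.getD j false)) c
        else c).getD k false
          = ((c.getD k false).xor (x && (decide (off ≤ k) && b.getD (k - off) false))) := by
      simp only [List.getD_cons_zero, Nat.add_zero]
      cases x
      · exact ⟨rfl, fun k => by simp⟩
      · obtain ⟨h1, h2⟩ := innerB_char b off c (by simp at hb; omega)
        refine ⟨by simpa using h1, fun k => ?_⟩
        rw [if_pos rfl, h2 k]
        simp
    obtain ⟨hc1l, hc1c⟩ := hc1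
    obtain ⟨ihl, ihc⟩ := ih (off + 1) _ (by rw [hc1l]; simp at hb; omega)
    refine ⟨by rw [ihl, hc1l], fun k => ?_⟩
    rw [ihc k, hc1c k]
    rw [show prodValN (x :: t) b = ((if x then valN b else 0) ^^^ (2 * prodValN t b)) from rfl]
    rw [Nat.testBit_xor, two_mul_testBit]
    have hxb : (if x then valN b else 0).testBit (k - off) = (x && b.getD (k - off) false) := by
      cases x
      · simp
      · simp [valN_testBit]
    rw [hxb]
    by_cases hoff : off ≤ k
    · have d1 : decide (off ≤ k) = true := by simpa using hoff
      by_cases hko : k = off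
      · subst hko
        have d2 : decide (k + 1 ≤ k) = false := by simp
        have d3 : decide (1 ≤ k - k) = false := by simp
        rw [d1, d2, d3, Nat.sub_self]
        simp
      · have d2 : decide (off + 1 ≤ k) = true := by simp; omega
        have d3 : decide (1 ≤ k - off) = true := by simp; omega
        have harith : k - off - 1 = k - (off + 1) := by omega
        rw [d1, d2, d3, harith]
        simp
    · have d1 : decide (off ≤ k) = false := by simpa using hoff
      have d2 : decide (off + 1 ≤ k) = false := by simp; omega
      rw [d1, d2]
      simp

theorem outerA_char (b : List Bool) (a : List Bool) : ∀ (off : Nat) (ps : List Nat), ps.Nodup →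
    ((List.range a.length).foldl (fun ps i => if a.getD i false then
        (List.range b.length).foldl (fun ps j => if b.getD j false then (if ((off + i) + j) ∈ ps then ps.erase ((off + i) + j) else ps ++ [(off + i) + j]) else ps) ps
      else ps) ps).Nodup
    ∧ ∀ k, decide (k ∈ (List.range a.length).foldl (fun ps i => if a.getD i false then
        (List.range b.length).foldl (fun ps j => if b.getD j false then (if ((off + i) + j) ∈ ps then ps.erase ((off + i) + j) else ps ++ [(off + i) + j]) else ps) ps
      else ps) ps)
        = ((decide (k ∈ ps)).xor (decide (off ≤ k) && (prodValN a b).testBit (k - off))) := by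
  induction a with
  | nil => intro off ps hnd; refine ⟨hnd, fun k => ?_⟩; simp [prodValN]
  | cons x t ih =>
    intro off ps hnd
    rw [show (x :: t).length = t.length + 1 from rfl, List.range_succ_eq_map, List.foldl_cons,
      List.foldl_map]
    have hlam : (fun (ps : List Nat) (i : Nat) => if (x :: t).getD i.succ false then
          (List.range b.length).foldl (fun ps j => if b.getD j false then (if ((off + i.succ) + j) ∈ ps then ps.erase ((off + i.succ) + j) else ps ++ [(off + i.succ) + j]) else ps) ps
        else ps)
        = fun (ps : List Nat) (i : Nat) => if t.getD i false then
          (List.range b.length).foldl (fun ps j => if b.getD j false then (if (((off + 1) + i) + j) ∈ ps then ps.erase (((off + 1) + i) + j) else ps ++ [((off + 1) + i) + j]) else ps) ps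
        else ps := by
      funext ps i
      rw [List.getD_cons_succ, show off + i.succ = (off + 1) + i by omega]
    rw [hlam]
    have hps1 : (if (x :: t).getD 0 false then
          (List.range b.length).foldl (fun ps j => if b.getD j false then (if ((off + 0) + j) ∈ ps then ps.erase ((off + 0) + j) else ps ++ [(off + 0) + j]) else ps) ps
        else ps).Nodup
        ∧ ∀ k, decide (k ∈ (if (x :: t).getD 0 false then
          (List.range b.length).foldl (fun ps j => if b.getD j false then (if ((off + 0) + j) ∈ ps then ps.erase ((off + 0) + j) else ps ++ [(off + 0) + j]) else ps) ps
        else ps))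
          = ((decide (k ∈ ps)).xor (x && (decide (off ≤ k) && b.getD (k - off) false))) := by
      simp only [List.getD_cons_zero, Nat.add_zero]
      cases x
      · exact ⟨hnd, fun k => by simp⟩
      · obtain ⟨h1, h2⟩ := innerA_char b off ps hnd
        refine ⟨by simpa using h1, fun k => ?_⟩
        rw [if_pos rfl, h2 k]
        simp
    obtain ⟨hnd1, hm1⟩ := hps1
    obtain ⟨ihnd, ihc⟩ := ih (off + 1) _ hnd1
    refine ⟨ihnd, fun k => ?_⟩
    rw [ihc k, hm1 k]
    rw [show prodValN (x :: t) b = ((if x then valN b else 0) ^^^ (2 * prodValN t b)) from rfl]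
    rw [Nat.testBit_xor, two_mul_testBit]
    have hxb : (if x then valN b else 0).testBit (k - off) = (x && b.getD (k - off) false) := by
      cases x
      · simp
      · simp [valN_testBit]
    rw [hxb]
    by_cases hoff : off ≤ k
    · have d1 : decide (off ≤ k) = true := by simpa using hoff
      by_cases hko : k = off
      · subst hko
        have d2 : decide (k + 1 ≤ k) = false := by simp
        have d3 : decide (1 ≤ k - k) = false := by simp
        rw [d1, d2, d3, Nat.sub_self]
        simp
      · have d2 : decide (off + 1 ≤ k) = true := by simp; omega
        have d3 : decide (1 ≤ k - off) = true := by simp; omega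
        have harith : k - off - 1 = k - (off + 1) := by omega
        rw [d1, d2, d3, harith]
        simp
    · have d1 : decide (off ≤ k) = false := by simpa using hoff
      have d2 : decide (off + 1 ≤ k) = false := by simp; omega
      rw [d1, d2]
      simp

-- ---- bridging the characterizations to the ports ----
theorem productsA_char (a b : List Bool) :
    (productsA a b).Nodup ∧ ∀ k, decide (k ∈ productsA a b) = (prodValN a b).testBit k := by
  obtain ⟨h1, h2⟩ := outerA_char b a 0 [] List.nodup_nil
  simp only [Nat.zero_add] at h1 h2
  unfold productsA
  refine ⟨h1, fun k => ?_⟩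
  have h2k := h2 k
  rw [show decide (k ∈ ([] : List Nat)) = false from rfl, Bool.false_xor,
    show decide (0 ≤ k) = true by simp, Bool.true_and, Nat.sub_zero] at h2k
  exact h2k

theorem getD_replicate_false (n k : Nat) : (List.replicate n false).getD k false = false := by
  rcases Nat.lt_or_ge k n with h | h
  · simp [List.getD_eq_getElem?_getD, List.getElem?_replicate, h]
  · rw [getD_eq_false_of_le _ _ (by simpa using h)]

theorem altC_char (a b : List Bool) :
    ((List.range a.length).foldl (fun c i => if a.getD i false then
        (List.range b.length).foldl (fun c j => c.set (i + j) (c.getD (i + j) false ^^ b.getD j false)) c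
      else c) (List.replicate (a.length + b.length - 1) false)).length = a.length + b.length - 1
    ∧ ∀ k, ((List.range a.length).foldl (fun c i => if a.getD i false then
        (List.range b.length).foldl (fun c j => c.set (i + j) (c.getD (i + j) false ^^ b.getD j false)) c
      else c) (List.replicate (a.length + b.length - 1) false)).getD k false = (prodValN a b).testBit k := by
  obtain ⟨h1, h2⟩ := outerB_char b a 0 (List.replicate (a.length + b.length - 1) false)
    (by simp; omega)
  simp only [Nat.zero_add] at h1 h2
  rw [List.length_replicate] at h1
  refine ⟨h1, fun k => ?_⟩
  have h2k := h2 k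
  rw [getD_replicate_false, Bool.false_xor, show decide (0 ≤ k) = true by simp,
    Bool.true_and, Nat.sub_zero] at h2k
  exact h2k

-- ---- result stage ----
theorem repl_fold (n : Nat) : ∀ (r : List Bool),
    (List.range n).foldl (fun r _ => r ++ [false]) r = r ++ List.replicate n false := by
  induction n with
  | zero => intro r; simp
  | succ n ih =>
    intro r
    rw [List.range_succ, List.foldl_append, List.foldl_cons, List.foldl_nil, ih,
      List.replicate_succ' , List.append_assoc]

theorem setTrue_char (ps : List Nat) : ∀ (r : List Bool), (∀ v ∈ ps, v < r.length) →
    (ps.foldl (fun r v => r.set v true) r).length = r.length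
    ∧ ∀ k, (ps.foldl (fun r v => r.set v true) r).getD k false = (decide (k ∈ ps) || r.getD k false) := by
  induction ps with
  | nil => intro r _; refine ⟨rfl, fun k => ?_⟩; simp
  | cons v t ih =>
    intro r hbound
    rw [List.foldl_cons]
    obtain ⟨ihl, ihc⟩ := ih (r.set v true) (by intro w hw; rw [List.length_set]; exact hbound w (by simp [hw]))
    refine ⟨by rw [ihl, List.length_set], fun k => ?_⟩
    rw [ihc k, getD_set]
    by_cases hk : k = v
    · subst hk
      rw [if_pos ⟨rfl, hbound k (by simp)⟩]
      simp
    · rw [if_neg (by intro hc; exact hk hc.1.symm)]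
      simp [List.mem_cons, hk]

-- ---- the reduction lockstep ----
theorem gfmodA_succ (fuel : Nat) (p0 m0 p mo : List Bool) (hp : irreductA p0 = some p)
    (hm : irreductA m0 = some mo) :
    gfmodA (fuel + 1) p0 m0 = if valueA p < valueA mo then some p
      else gfmodA fuel ((List.range p.length).foldl
        (fun q i => q.set i (q.getD i false ^^ (List.replicate (p.length - mo.length) false ++ mo).getD i false)) p) mo := by
  simp only [gfmodA, hp, hm]

theorem irreductA_m : irreductA mListA = some mListA := by
  rw [irreductA_eq_strip mListA (by decide), stripB_last_true mListA (by rfl)]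

theorem cond9_true (c : List Bool) (h9 : c.length = 9) (hTt : c.getLast? = some true)
    (hge : 285 ≤ valN c) : geB c = true := by
  obtain ⟨a0, a1, a2, a3, a4, a5, a6, a7, a8, rfl⟩ := list9 c h9
  have ha8 : a8 = true := by simpa using hTt
  subst ha8
  exact (ge9_iff a0 a1 a2 a3 a4 a5 a6 a7).mpr hge

theorem cond9_false (c : List Bool) (h9 : c.length = 9) (hTt : c.getLast? = some true)
    (hlt : valN c < 285) : geB c = false := by
  obtain ⟨a0, a1, a2, a3, a4, a5, a6, a7, a8, rfl⟩ := list9 c h9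
  have ha8 : a8 = true := by simpa using hTt
  subst ha8
  cases hgeB : geB [a0, a1, a2, a3, a4, a5, a6, a7, true]
  · rfl
  · have := (ge9_iff a0 a1 a2 a3 a4 a5 a6 a7).mp hgeB
    omega

theorem main_red : ∀ (v : Nat) (p : List Bool) (fa fb : Nat), valN p = v → true ∈ p →
    red285 v ≠ 0 → v < fa → (stripB p).length < fb →
    gfmodA fa p mListA = some (reduceB fb (stripB p)) := by
  intro v
  induction v using Nat.strong_induction_on with
  | _ v ih =>
    intro p fa fb hv hmem hred hfa hfb
    obtain ⟨fa', rfl⟩ : ∃ fa', fa = fa' + 1 := ⟨fa - 1, by omega⟩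
    obtain ⟨fb', rfl⟩ : ∃ fb', fb = fb' + 1 := ⟨fb - 1, by omega⟩
    rw [gfmodA_succ fa' p mListA (stripB p) mListA (irreductA_eq_strip p hmem) irreductA_m]
    have hTt : (stripB p).getLast? = some true := strip_Tt p hmem
    have hvq : valN (stripB p) = v := by rw [valN_strip, hv]
    have hvA : valueA (stripB p) = (v : Int) := by rw [valueA_eq, hvq]
    rw [hvA, valueA_m]
    by_cases hlt : v < 285
    · rw [if_pos (by exact_mod_cast hlt)]
      rw [reduceB]
      rw [if_neg]
      intro hcond
      rcases hcond with h9 | ⟨h9, hge⟩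
      · have hge2 := valN_ge_of_last (stripB p) hTt
        have : (2:Nat) ^ 9 ≤ 2 ^ ((stripB p).length - 1) := Nat.pow_le_pow_right (by omega) (by omega)
        omega
      · have := (cond9_false (stripB p) h9 hTt (by omega))
        rw [this] at hge
        exact Bool.false_ne_true hge
    · rw [if_neg (by exact_mod_cast hlt)]
      have h9 : 9 ≤ (stripB p).length := by
        have hlt2 := valN_lt (stripB p)
        rw [hvq] at hlt2
        by_contra hc
        push_neg at hc
        have : (2:Nat) ^ (stripB p).length ≤ 2 ^ 8 := Nat.pow_le_pow_right (by omega) (by omega)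
        omega
      rw [xorA_eq_xorB (stripB p) h9]
      have hlq : (xorMB (stripB p)).length = (stripB p).length := (xorMB_char (stripB p) h9).1
      have hlog : (stripB p).length - 9 = v.log2 - 8 := by
        have := length_of_last (stripB p) hTt
        rw [hvq] at this
        omega
      have hv' : valN (xorMB (stripB p)) = v ^^^ (285 <<< (v.log2 - 8)) := by
        rw [valN_xorM (stripB p) h9, hvq, hlog]
      have hstep : valN (xorMB (stripB p)) < v := by
        rw [hv']; exact step_lt (by omega)
      have hred' : red285 (valN (xorMB (stripB p))) ≠ 0 := by
        rw [red285_eq] at hred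
        rw [if_neg (by omega)] at hred
        rwa [← hv'] at hred
      have hmemq : true ∈ xorMB (stripB p) := by
        by_contra hc
        have h0 : valN (xorMB (stripB p)) = 0 := (valN_eq_zero_iff _).mpr hc
        have heq : red285 (valN (xorMB (stripB p))) = valN (xorMB (stripB p)) := by
          rw [red285_eq, if_pos (by omega)]
        exact hred' (by rw [heq, h0])
      have hBstep : reduceB (fb' + 1) (stripB p) = reduceB fb' (stripB (xorMB (stripB p))) := by
        rw [reduceB]
        rw [if_pos]
        rcases Nat.lt_or_ge 9 (stripB p).length with h | h
        · exact Or.inl h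
        · exact Or.inr ⟨by omega, cond9_true (stripB p) (by omega) hTt (by omega)⟩
      rw [hBstep]
      have hlast_q : (xorMB (stripB p)).getLast? = some false := by
        have hne : xorMB (stripB p) ≠ [] := by
          intro h0
          rw [h0] at hlq
          simp at hlq
          omega
        rw [getLast?_of_getD _ hne]
        obtain ⟨_, hc⟩ := xorMB_char (stripB p) h9
        rw [hlq, hc ((stripB p).length - 1), if_pos ⟨by omega, by omega⟩,
          getLast?_getD (stripB p) true hTt,
          show (stripB p).length - 1 - ((stripB p).length - 9) = 8 by omega]
        rfl
      have hfb2 : (stripB (xorMB (stripB p))).length < fb' := by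
        have h1 := strip_length_lt _ hlast_q
        rw [hlq] at h1
        omega
      exact ih (valN (xorMB (stripB p))) hstep (xorMB (stripB p)) fa' fb' rfl hmemq hred'
        (by omega) hfb2

-- ===== VERDICT (by name: the statement is the Claim_ definition above) =====
theorem GF_product_p_spec : Claim_equal_GF_product_p := by
  intro a b _ hpre
  obtain ⟨ha, hb, hred⟩ := hpre
  unfold Spec_GF_product_p
  obtain ⟨hnd, hmem⟩ := productsA_char a b
  obtain ⟨hcl, hcc⟩ := altC_char a b
  have hP0 : prodValN a b ≠ 0 := by
    intro h0
    rw [h0] at hred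
    exact hred rfl
  set craw := (List.range a.length).foldl (fun c i => if a.getD i false then
      (List.range b.length).foldl (fun c j => c.set (i + j) (c.getD (i + j) false ^^ b.getD j false)) c
    else c) (List.replicate (a.length + b.length - 1) false) with hcraw
  have hvcraw : valN craw = prodValN a b := by
    apply Nat.eq_of_testBit_eq
    intro i
    rw [valN_testBit, hcc i]
  have hmemc : true ∈ craw := by
    by_contra hc
    exact hP0 (by rw [← hvcraw]; exact (valN_eq_zero_iff _).mpr hc)
  have hpsne : productsA a b ≠ [] := by
    intro h0
    apply hP0
    apply Nat.eq_of_testBit_eq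
    intro i
    rw [← hmem i, h0]
    simp
  obtain ⟨mx, hmx⟩ : ∃ mx, PySem.List.max? (productsA a b) (fun x => x) = some mx := by
    cases hcase : PySem.List.max? (productsA a b) (fun x => x) with
    | none => exact absurd ((PySem.List.max?_eq_none_iff (productsA a b) (fun x => x)).mp hcase) hpsne
    | some m => exact ⟨m, rfl⟩
  have hmxmem : mx ∈ productsA a b := PySem.List.max?_mem hmx
  have hmxmax : ∀ w ∈ productsA a b, w ≤ mx := fun w hw => PySem.List.max?_isMax hmx w hw
  obtain ⟨hRl, hRc⟩ := setTrue_char (productsA a b) (List.replicate (mx + 1) false)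
    (by intro w hw; rw [List.length_replicate]; have := hmxmax w hw; omega)
  have hr0 : (List.range (mx + 1)).foldl (fun r _ => r ++ [false]) [] = List.replicate (mx + 1) false := by
    rw [repl_fold]
    rfl
  set R := (productsA a b).foldl (fun r v => r.set v true) (List.replicate (mx + 1) false) with hRdef
  have hRget : ∀ k, R.getD k false = decide (k ∈ productsA a b) := by
    intro k
    rw [hRdef, hRc k, getD_replicate_false, Bool.or_false]
  have hRlen : R.length = mx + 1 := by rw [hRdef, hRl, List.length_replicate]
  have hRne : R ≠ [] := by intro h0; rw [h0] at hRlen; simp at hRlen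
  have hRlast : R.getLast? = some true := by
    rw [getLast?_of_getD R hRne, hRlen, show mx + 1 - 1 = mx by omega, hRget mx]
    simp [hmxmem]
  have hkey : ∀ k, R.getD k false = (stripB craw).getD k false := by
    intro k
    rw [hRget k, strip_getD, hcc k, hmem k]
  have hstripTt : (stripB craw).getLast? = some true := strip_Tt craw hmemc
  have hReq : R = stripB craw := list_eq_of_getD R _ hRlast hstripTt hkey
  have hvR : valN R = prodValN a b := by rw [hReq, valN_strip, hvcraw]
  have hRmem : true ∈ R := by
    by_contra hc
    exact hP0 (by rw [← hvR]; exact (valN_eq_zero_iff _).mpr hc)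
  have hA : GF_product_p a b = (gfmodA ((valueA R).toNat + 1) R mListA).getD [] := by
    simp only [GF_product_p, hmx]
    rw [hr0]
  have hfuel : (valueA R).toNat + 1 = valN R + 1 := by
    rw [valueA_eq, Int.toNat_natCast]
  have hB : GF_product_p_alt a b = reduceB ((stripB craw).length + 1) (stripB craw) := rfl
  have hmain := main_red (prodValN a b) R (prodValN a b + 1) ((stripB craw).length + 1) hvR hRmem
    hred (by omega) (by rw [stripB_last_true R hRlast, hReq]; omega)
  rw [hA, hB, hfuel, hvR, hmain, Option.getD_some, stripB_last_true R hRlast, hReq]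

@[simp] theorem GF_product_p_raises : Claim_raises_GF_product_p := by
  unfold Claim_raises_GF_product_p
  exact ⟨by intro a b _ h hp; rcases hp with ⟨h1, h2, h3⟩; rcases h with h | h | h <;> simp_all, by decide⟩
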